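-- pv_equiv track=rewrite | github.com/MarcelRyan/Tubes-TBFO | FA.py | ValueValid
-- ===== SOURCE A (Python) =====
-- def state_4(char): # Start state untuk mengecek apakah sebuah value valid atau tidak
--     if (ord(char) >= 48 and ord(char) <= 57):
--         state = 5
--     elif (ord(char) == 45):
--         state = 14
--     else:
--         state = 6
--     return state
--
-- def state_14(char):
--     if (ord(char) >= 48 and ord(char) <= 57):
--         state = 5
--     else:
--         state = 6
--     return state
--
-- def state_5(char): # Final state untuk mengecek apakah sebuah value valid atau tidak
--     if (ord(char) >= 48 and ord(char) <= 57):
--         state = 5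
--     else:
--         state = 6
--     return state
--
-- def state_6(char): # Dead state apabila value sudah pasti tidak valid
--     state = 6
--     return state
--
-- def ValueValid(str): # Simulasi FA untuk mengecek apakah syntax value sudah valid menggunakan state 4, 5, 6
--     state = 4
--     for i in range(len(str)):
--         if (state == 4):
--             state = state_4(str[i])
--         elif (state == 5):
--             state = state_5(str[i])
--         elif (state == 6):
--             state = state_6(str[i])
--         elif (state == 14):
--             state = state_14(str[i])
--
--     if (state == 5):
--         return True
--     else:
--         return False
-- ===== SOURCE B (Python) =====
-- def ValueValid(str):
--     s = str[1:] if str[:1] == '-' else str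
--     return len(s) > 0 and all('0' <= c <= '9' for c in s)
-- ===== Notes on version B (the rewrite author's own statement) =====
-- stated objective: simpler
-- what changed: Replaces the four state functions and the per-character state-dispatch DFA loop with a direct structural check: strip an optional leading minus sign, then require a non-empty all-ASCII-digit remainder.
import Mathlib
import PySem

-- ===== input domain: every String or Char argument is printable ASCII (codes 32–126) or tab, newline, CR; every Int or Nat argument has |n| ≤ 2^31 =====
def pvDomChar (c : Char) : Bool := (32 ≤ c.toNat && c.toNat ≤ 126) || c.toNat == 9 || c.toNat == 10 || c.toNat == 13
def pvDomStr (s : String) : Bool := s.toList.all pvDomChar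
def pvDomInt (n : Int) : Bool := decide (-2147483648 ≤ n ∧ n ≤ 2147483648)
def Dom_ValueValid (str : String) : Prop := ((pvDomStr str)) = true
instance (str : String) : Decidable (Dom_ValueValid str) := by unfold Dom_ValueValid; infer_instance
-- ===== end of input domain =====

-- B replaces A's four-state DFA simulation with a direct structural check (optional '-', then non-empty digits); objective: simpler.


-- ===== PORT A =====
def state_4 (c : Char) : Int :=
  if 48 ≤ c.toNat ∧ c.toNat ≤ 57 then 5
  else if c.toNat = 45 then 14
  else 6

def state_14 (c : Char) : Int :=
  if 48 ≤ c.toNat ∧ c.toNat ≤ 57 then 5 else 6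

def state_5 (c : Char) : Int :=
  if 48 ≤ c.toNat ∧ c.toNat ≤ 57 then 5 else 6

def state_6 (_c : Char) : Int := 6

def pvStepA (st : Int) (c : Char) : Int :=
  if st = 4 then state_4 c
  else if st = 5 then state_5 c
  else if st = 6 then state_6 c
  else if st = 14 then state_14 c
  else st

def ValueValid (str : String) : Bool :=
  let st := str.toList.foldl pvStepA 4
  if st = 5 then true else false

-- ===== PORT B =====
def pvIsDig (c : Char) : Bool := decide ('0' ≤ c ∧ c ≤ '9')

def ValueValid_alt (str : String) : Bool :=
  let l := str.toList
  let s := if l.take 1 = ['-'] then l.drop 1 else l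
  decide (s.length > 0) && s.all pvIsDig

-- ===== PRECONDITION & SPEC =====
def Spec_ValueValid (str : String) (out : Bool) : Prop := out = ValueValid_alt str
instance (str : String) (out : Bool) : Decidable (Spec_ValueValid str out) := by unfold Spec_ValueValid; infer_instance

-- ===== CLAIM (what is proved, stated in full; the proofs are below) =====
def Claim_equal_ValueValid : Prop := ∀ (str : String), Dom_ValueValid str → Spec_ValueValid str (ValueValid str)

-- ===== LEMMAS AND PROOFS =====
theorem pv_dead (l : List Char) : l.foldl pvStepA 6 = 6 := by
  induction l with
  | nil => rfl
  | cons c cs ih => simpa [pvStepA, state_6] using ih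

theorem pv_dig_iff (c : Char) : (48 ≤ c.toNat ∧ c.toNat ≤ 57) ↔ pvIsDig c = true := by
  simp [pvIsDig, Char.le_def]
  constructor
  · rintro ⟨h1, h2⟩
    exact ⟨by exact_mod_cast h1, by exact_mod_cast h2⟩
  · rintro ⟨h1, h2⟩
    exact ⟨by exact_mod_cast h1, by exact_mod_cast h2⟩

theorem pv_five (l : List Char) :
    l.foldl pvStepA 5 = if l.all pvIsDig then 5 else 6 := by
  induction l with
  | nil => rfl
  | cons c cs ih =>
    by_cases h : pvIsDig c = true
    · have h' := (pv_dig_iff c).mpr h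
      simp [pvStepA, state_5, h', h, ih]
    · have h' : ¬ (48 ≤ c.toNat ∧ c.toNat ≤ 57) := fun hc => h ((pv_dig_iff c).mp hc)
      simp [pvStepA, state_5, h', h, pv_dead]

-- ===== VERDICT (by name: the statement is the Claim_ definition above) =====
theorem ValueValid_spec : Claim_equal_ValueValid := by
  intro str _
  show ValueValid str = ValueValid_alt str
  unfold ValueValid ValueValid_alt
  cases hl : str.toList with
  | nil => simp
  | cons c cs =>
    simp only [List.foldl]
    by_cases hd : pvIsDig c = true
    · have h' := (pv_dig_iff c).mpr hd
      have hne : c ≠ '-' := by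
        intro h; subst h; simp [pvIsDig, Char.le_def] at hd
      simp [pvStepA, state_4, h', pv_five, hne, hd, List.all_eq_true]
      cases hall : cs.all pvIsDig <;>
        simp_all [List.all_eq_true]
    · have h' : ¬ (48 ≤ c.toNat ∧ c.toNat ≤ 57) := fun hc => hd ((pv_dig_iff c).mp hc)
      by_cases hm : c = '-'
      · subst hm
        simp only [pvStepA, state_4]
        norm_num
        cases cs with
        | nil => simp
        | cons d ds =>
          simp only [List.foldl]
          by_cases hd2 : pvIsDig d = true
          · have h2 := (pv_dig_iff d).mpr hd2
            simp [pvStepA, state_14, h2, pv_five, hd2, List.all_eq_true]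
            cases hall : ds.all pvIsDig <;>
              simp_all [List.all_eq_true]
          · have h2 : ¬ (48 ≤ d.toNat ∧ d.toNat ≤ 57) := fun hc => hd2 ((pv_dig_iff d).mp hc)
            simp [pvStepA, state_14, h2, pv_dead, hd2]
      · have hm' : c.toNat ≠ 45 := by
          intro h
          apply hm
          have hv : c.val.toNat = 45 := h
          have hv2 : c.val = ('-' : Char).val := by
            apply UInt32.toNat_inj.mp
            simp [hv]
          exact Char.ext hv2
        simp [pvStepA, state_4, h', hm', pv_dead, hm]
        exact fun h => absurd h hd
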